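-- pv_equiv track=rewrite | github.com/GauravKrv/tunix-hackathon | inference.py | parse_reasoning_steps
-- ===== SOURCE A (Python) =====
-- from typing import Dict, List, Optional
--
-- def parse_reasoning_steps(text: str) -> List[str]:
--     """
--     Parse reasoning text into individual steps.
--
--     Args:
--         text: Generated reasoning text
--
--     Returns:
--         List of reasoning steps
--     """
--     steps = []
--
--     # Common step indicators
--     step_markers = [
--         "Step ",
--         "step ",
--         "\n\n",
--         "First,",
--         "Second,",
--         "Third,",
--         "Finally,",
--         "Therefore,",
--     ]
--
--     # Split by double newlines or explicit step markers
--     lines = text.split('\n')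
--     current_step = []
--
--     for line in lines:
--         line = line.strip()
--         if not line:
--             if current_step:
--                 steps.append(' '.join(current_step))
--                 current_step = []
--         else:
--             current_step.append(line)
--
--     if current_step:
--         steps.append(' '.join(current_step))
--
--     return steps if steps else [text]
-- ===== SOURCE B (Python) =====
-- def parse_reasoning_steps(text: str):
--     """Group stripped lines into blocks of consecutive non-blank lines (two-pointer scan)."""
--     stripped = [ln.strip() for ln in text.split('\n')]
--     steps = []
--     i, n = 0, len(stripped)
--     while i < n:
--         if not stripped[i]:
--             i += 1
--             continue
--         j = i + 1
--         while j < n and stripped[j]: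
--             j += 1
--         steps.append(' '.join(stripped[i:j]))
--         i = j
--     return steps if steps else [text]
-- ===== Notes on version B (the rewrite author's own statement) =====
-- stated objective: alternative
-- what changed: Replaces the accumulator-with-flush-on-blank loop by stripping all lines up front and a two-pointer scan that finds each maximal block of consecutive non-blank lines and joins it directly.
import Mathlib
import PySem

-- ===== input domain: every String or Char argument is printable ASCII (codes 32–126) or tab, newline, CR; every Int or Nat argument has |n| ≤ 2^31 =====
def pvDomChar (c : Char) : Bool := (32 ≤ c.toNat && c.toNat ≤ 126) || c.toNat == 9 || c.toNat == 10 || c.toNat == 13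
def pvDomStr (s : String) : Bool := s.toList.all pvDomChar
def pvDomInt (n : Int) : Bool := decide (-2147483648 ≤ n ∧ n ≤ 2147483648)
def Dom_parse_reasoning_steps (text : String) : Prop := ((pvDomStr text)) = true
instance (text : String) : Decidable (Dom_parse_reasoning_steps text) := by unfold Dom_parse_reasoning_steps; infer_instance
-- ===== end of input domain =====

-- B groups the stripped lines by a two-pointer block scan instead of A's accumulator flushed on blanks; same value everywhere (objective: alternative).

-- ===== PORT A =====
-- loop body on an already-stripped line: flush current step on a blank line, else extend it
def pvStepCore (acc : List String × List String) (line : String) : List String × List String :=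
  if line = "" then
    if acc.2 = [] then acc else (acc.1 ++ [PySem.Str.join " " acc.2], [])
  else (acc.1, acc.2 ++ [line])

-- A's loop body: 'line = line.strip()' then the branch above
def pvStepA (acc : List String × List String) (line : String) : List String × List String :=
  pvStepCore acc (PySem.Str.strip line)

-- the trailing 'if current_step: steps.append(...)'
def pvFlushA (p : List String × List String) : List String :=
  if p.2 = [] then p.1 else p.1 ++ [PySem.Str.join " " p.2]

def parse_reasoning_steps (text : String) : List String :=
  -- sep "\n" is non-empty, so split? never returns none
  let lines := (PySem.Str.split? text "\n").getD []
  let steps := pvFlushA (lines.foldl pvStepA ([], []))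
  if steps = [] then [text] else steps

-- ===== PORT B =====
-- the outer while loop of B, on the suffix of the stripped lines from index i;
-- the inner 'while j < n and stripped[j]' is the takeWhile/dropWhile block split
def pvBlocks (ls : List String) : List String :=
  match ls with
  | [] => []
  | s :: rest =>
      if s = "" then pvBlocks rest
      else PySem.Str.join " " (s :: rest.takeWhile (fun l => l != "")) ::
           pvBlocks (rest.dropWhile (fun l => l != ""))
termination_by ls.length
decreasing_by
  · simp
  · simpa using Nat.lt_succ_of_le (List.length_dropWhile_le _ _)

def parse_reasoning_steps_alt (text : String) : List String :=
  let stripped := ((PySem.Str.split? text "\n").getD []).map PySem.Str.strip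
  let steps := pvBlocks stripped
  if steps = [] then [text] else steps

-- ===== PRECONDITION & SPEC =====
def Spec_parse_reasoning_steps (text : String) (out : List String) : Prop := out = parse_reasoning_steps_alt text
instance (text : String) (out : List String) : Decidable (Spec_parse_reasoning_steps text out) := by unfold Spec_parse_reasoning_steps; infer_instance

-- ===== CLAIM (what is proved, stated in full; the proofs are below) =====
def Claim_equal_parse_reasoning_steps : Prop := ∀ (text : String), Dom_parse_reasoning_steps text → Spec_parse_reasoning_steps text (parse_reasoning_steps text)

-- ===== LEMMAS AND PROOFS =====

-- invariant of A's fold on stripped lines: pending step 'cur' merges into the first block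
theorem pvFold_eq_blocks (ls : List String) : ∀ (steps cur : List String),
    pvFlushA (ls.foldl pvStepCore (steps, cur)) =
      steps ++ (if cur = [] then pvBlocks ls
                else PySem.Str.join " " (cur ++ ls.takeWhile (fun l => l != "")) ::
                     pvBlocks (ls.dropWhile (fun l => l != ""))) := by
  induction ls with
  | nil =>
      intro steps cur
      by_cases h : cur = [] <;> simp [pvFlushA, h, pvBlocks]
  | cons l rest ih =>
      intro steps cur
      by_cases hl : l = ""
      · by_cases hc : cur = []
        · simp [pvStepCore, hl, hc, ih, pvBlocks]
        · simp [pvStepCore, hl, hc, ih, pvBlocks]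
      · have hne : cur ++ [l] ≠ [] := by simp
        simp only [List.foldl_cons, pvStepCore, if_neg hl]
        rw [ih]
        by_cases hc : cur = [] <;>
          simp [hc, hl, pvBlocks]

theorem pv_A_eq_B (text : String) : parse_reasoning_steps text = parse_reasoning_steps_alt text := by
  unfold parse_reasoning_steps parse_reasoning_steps_alt
  have h : ∀ (lines : List String),
      pvFlushA (lines.foldl pvStepA ([], [])) = pvBlocks (lines.map PySem.Str.strip) := by
    intro lines
    have : lines.foldl pvStepA ([], []) =
        (lines.map PySem.Str.strip).foldl pvStepCore ([], []) := by
      rw [List.foldl_map]; rfl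
    rw [this, pvFold_eq_blocks]
    simp
  simp [h]

-- ===== VERDICT (by name: the statement is the Claim_ definition above) =====
theorem parse_reasoning_steps_spec : Claim_equal_parse_reasoning_steps := by
  intro text _
  unfold Spec_parse_reasoning_steps
  exact pv_A_eq_B text
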